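-- pv_equiv track=rewrite | github.com/DailyForkCast/osint-foresight | scripts/validation/core_validation_framework.py | _get_remediation_steps
-- ===== SOURCE A (Python) =====
-- from typing import Dict, List, Optional, Tuple, Any, Union
--
-- def _get_remediation_steps(errors: List[str]) -> List[str]:
--     """Get remediation steps for validation errors"""
--     steps = []
--
--     if any("as_of" in e for e in errors):
--         steps.append("Add as_of timestamp to all entries")
--
--     if any("alternative_explanations" in e for e in errors):
--         steps.append("Add alternative_explanations to all entries")
--
--     if any("NPKT" in e for e in errors):
--         steps.append("Add NPKT references for all numeric claims")
--
--     if any("translation_safeguards" in e for e in errors):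
--         steps.append("Add translation safeguards for non-English sources")
--
--     if any("negative_evidence" in e for e in errors):
--         steps.append("Log negative evidence for all searches")
--
--     return steps
-- ===== SOURCE B (Python) =====
-- def _get_remediation_steps(errors):
--     """Get remediation steps for validation errors (single pass over errors)."""
--     f1 = f2 = f3 = f4 = f5 = False
--     for e in errors:
--         if "as_of" in e:
--             f1 = True
--         if "alternative_explanations" in e:
--             f2 = True
--         if "NPKT" in e:
--             f3 = True
--         if "translation_safeguards" in e:
--             f4 = True
--         if "negative_evidence" in e:
--             f5 = True
--     steps = []
--     if f1:
--         steps.append("Add as_of timestamp to all entries")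
--     if f2:
--         steps.append("Add alternative_explanations to all entries")
--     if f3:
--         steps.append("Add NPKT references for all numeric claims")
--     if f4:
--         steps.append("Add translation safeguards for non-English sources")
--     if f5:
--         steps.append("Log negative evidence for all searches")
--     return steps
-- ===== Notes on version B (the rewrite author's own statement) =====
-- stated objective: alternative
-- what changed: Replaces the five separate any() scans over the errors list with one single pass that sets five boolean flags, then appends the step strings in the fixed order from the flags.
import Mathlib
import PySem

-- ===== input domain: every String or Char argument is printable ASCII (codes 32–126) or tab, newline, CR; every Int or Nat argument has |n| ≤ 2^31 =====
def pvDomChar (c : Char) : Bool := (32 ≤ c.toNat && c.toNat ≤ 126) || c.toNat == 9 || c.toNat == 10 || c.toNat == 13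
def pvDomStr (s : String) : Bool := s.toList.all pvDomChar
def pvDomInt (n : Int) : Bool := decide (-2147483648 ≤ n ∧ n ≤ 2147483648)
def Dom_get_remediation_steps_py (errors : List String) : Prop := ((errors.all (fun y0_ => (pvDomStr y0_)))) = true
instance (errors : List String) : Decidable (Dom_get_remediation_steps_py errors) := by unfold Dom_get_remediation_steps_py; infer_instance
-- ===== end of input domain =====

-- B replaces A's five separate any() scans with one single pass over errors setting five flags (alternative decomposition, same cost class).


-- ===== PORT A =====
-- literal transliteration: steps starts empty; five any-scans, each conditionally appending one step
def get_remediation_steps_py (errors : List String) : List String :=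
  let steps : List String := []
  let steps := if errors.any (fun e => PySem.Str.isIn "as_of" e) then
      steps ++ ["Add as_of timestamp to all entries"] else steps
  let steps := if errors.any (fun e => PySem.Str.isIn "alternative_explanations" e) then
      steps ++ ["Add alternative_explanations to all entries"] else steps
  let steps := if errors.any (fun e => PySem.Str.isIn "NPKT" e) then
      steps ++ ["Add NPKT references for all numeric claims"] else steps
  let steps := if errors.any (fun e => PySem.Str.isIn "translation_safeguards" e) then
      steps ++ ["Add translation safeguards for non-English sources"] else steps
  let steps := if errors.any (fun e => PySem.Str.isIn "negative_evidence" e) then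
      steps ++ ["Log negative evidence for all searches"] else steps
  steps

-- ===== PORT B =====
-- one fold over errors maintaining five boolean flags, then conditional appends from the flags
def remSteps_flagStep (st : Bool × Bool × Bool × Bool × Bool) (e : String) :
    Bool × Bool × Bool × Bool × Bool :=
  let f1 := if PySem.Str.isIn "as_of" e then true else st.1
  let f2 := if PySem.Str.isIn "alternative_explanations" e then true else st.2.1
  let f3 := if PySem.Str.isIn "NPKT" e then true else st.2.2.1
  let f4 := if PySem.Str.isIn "translation_safeguards" e then true else st.2.2.2.1
  let f5 := if PySem.Str.isIn "negative_evidence" e then true else st.2.2.2.2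
  (f1, f2, f3, f4, f5)

def get_remediation_steps_py_alt (errors : List String) : List String :=
  let fs := errors.foldl remSteps_flagStep (false, false, false, false, false)
  let steps : List String := []
  let steps := if fs.1 then steps ++ ["Add as_of timestamp to all entries"] else steps
  let steps := if fs.2.1 then steps ++ ["Add alternative_explanations to all entries"] else steps
  let steps := if fs.2.2.1 then steps ++ ["Add NPKT references for all numeric claims"] else steps
  let steps := if fs.2.2.2.1 then steps ++ ["Add translation safeguards for non-English sources"] else steps
  let steps := if fs.2.2.2.2 then steps ++ ["Log negative evidence for all searches"] else steps
  steps

-- ===== PRECONDITION & SPEC =====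
def Spec_get_remediation_steps_py (errors : List String) (out : List String) : Prop := out = get_remediation_steps_py_alt errors
instance (errors : List String) (out : List String) : Decidable (Spec_get_remediation_steps_py errors out) := by unfold Spec_get_remediation_steps_py; infer_instance

-- ===== CLAIM (what is proved, stated in full; the proofs are below) =====
def Claim_equal_get_remediation_steps_py : Prop := ∀ (errors : List String), Dom_get_remediation_steps_py errors → Spec_get_remediation_steps_py errors (get_remediation_steps_py errors)

-- ===== LEMMAS AND PROOFS =====

-- the fold's five flags are exactly the five any-scans (seeded with arbitrary initial flags)
theorem remSteps_foldl_eq (errors : List String) (f1 f2 f3 f4 f5 : Bool) :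
    errors.foldl remSteps_flagStep (f1, f2, f3, f4, f5) =
      (f1 || errors.any (fun e => PySem.Str.isIn "as_of" e),
       f2 || errors.any (fun e => PySem.Str.isIn "alternative_explanations" e),
       f3 || errors.any (fun e => PySem.Str.isIn "NPKT" e),
       f4 || errors.any (fun e => PySem.Str.isIn "translation_safeguards" e),
       f5 || errors.any (fun e => PySem.Str.isIn "negative_evidence" e)) := by
  induction errors generalizing f1 f2 f3 f4 f5 with
  | nil => simp
  | cons e rest ih =>
    simp only [List.foldl_cons, List.any_cons, remSteps_flagStep, ih]
    split_ifs <;> simp_all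

-- ===== VERDICT (by name: the statement is the Claim_ definition above) =====
theorem get_remediation_steps_py_spec : Claim_equal_get_remediation_steps_py := by
  intro errors _
  unfold Spec_get_remediation_steps_py get_remediation_steps_py get_remediation_steps_py_alt
  rw [remSteps_foldl_eq]
  simp
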